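-- pv_equiv track=rewrite | github.com/gerquinn1978/gvm | grounded-vibe-methodology/skills/gvm-walking-skeleton/scripts/_ci_writer.py | _has_indented_key_under
-- ===== SOURCE A (Python) =====
-- def _has_indented_key_under(text: str, parent: str, child: str) -> bool:
--     """True if `parent` (a top-level key like `jobs:`) appears as a line and
--     a subsequent indented line starts with `child` (e.g. `walking-skeleton:`)
--     before the next top-level key. Blank lines do not reset the parent
--     context (review I-3). CRLF-tolerant."""
--     in_parent = False
--     for raw in text.splitlines():
--         line = raw.rstrip("\r\n")
--         if line == "":
--             # Blank lines do not reset parent context.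
--             continue
--         stripped = line.lstrip()
--         indent = len(line) - len(stripped)
--         if indent == 0:
--             in_parent = line == parent or line.startswith(parent + " ")
--             continue
--         if in_parent and (
--             stripped == child
--             or stripped.startswith(child + " ")
--             or stripped.startswith(child + "\t")
--         ):
--             return True
--     return False
-- ===== SOURCE B (Python) =====
-- def _has_indented_key_under(text: str, parent: str, child: str) -> bool:
--     """Build-then-scan: first group non-blank lines into top-level blocks
--     (header line + its indented children, CRLF-tolerant), then scan the
--     blocks for one whose header matches `parent` and whose children
--     contain an entry matching `child`."""
--     blocks = []  # list of (header_line, [stripped child lines])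
--     for raw in text.splitlines():
--         line = raw.rstrip("\r\n")
--         if line == "":
--             continue
--         stripped = line.lstrip()
--         if len(stripped) == len(line):
--             blocks.append((line, []))
--         elif blocks:
--             blocks[-1][1].append(stripped)
--
--     def pmatch(h):
--         return h == parent or h.startswith(parent + " ")
--
--     def cmatch(s):
--         return s == child or s.startswith(child + " ") or s.startswith(child + "\t")
--
--     return any(pmatch(h) and any(cmatch(s) for s in kids) for h, kids in blocks)
-- ===== Notes on version B (the rewrite author's own statement) =====
-- stated objective: alternative
-- what changed: Replaces A's single interleaved state machine (an in_parent flag updated while scanning, with an early return) with a two-phase build-then-scan: first group the non-blank lines into top-level blocks (header + stripped children), then scan the blocks for one matching parent with a child entry matching child.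
import Mathlib
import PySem

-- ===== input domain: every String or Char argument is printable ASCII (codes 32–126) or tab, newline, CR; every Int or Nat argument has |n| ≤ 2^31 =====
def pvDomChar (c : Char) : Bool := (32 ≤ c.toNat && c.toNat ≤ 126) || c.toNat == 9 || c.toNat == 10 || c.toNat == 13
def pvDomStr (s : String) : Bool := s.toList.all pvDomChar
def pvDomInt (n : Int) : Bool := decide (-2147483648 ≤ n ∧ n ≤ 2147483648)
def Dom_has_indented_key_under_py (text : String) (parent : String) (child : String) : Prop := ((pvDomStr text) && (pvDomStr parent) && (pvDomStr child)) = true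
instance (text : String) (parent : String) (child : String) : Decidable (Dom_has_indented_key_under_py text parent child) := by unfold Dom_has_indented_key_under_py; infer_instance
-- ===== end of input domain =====

-- B replaces A's interleaved in_parent state machine by a build-then-scan over top-level blocks (alternative decomposition, same cost).

-- ===== PORT A =====
-- raw.rstrip("\r\n") ported by hand (exact: drops trailing '\r'/'\n' characters)
def pvARstripCRLF (l : List Char) : List Char :=
  (l.reverse.dropWhile (fun c => c == '\r' || c == '\n')).reverse

def pvALoop (parent child : List Char) : List (List Char) → Bool → Bool
  | [], _ => false
  | raw :: rest, in_parent =>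
    let line := pvARstripCRLF raw
    if line = [] then pvALoop parent child rest in_parent
    else
      let stripped := PySem.Chars.lstrip line
      let indent := line.length - stripped.length
      if indent = 0 then
        pvALoop parent child rest
          (line == parent || PySem.Chars.startswith line (parent ++ [' ']))
      else if in_parent &&
          (stripped == child || PySem.Chars.startswith stripped (child ++ [' '])
            || PySem.Chars.startswith stripped (child ++ ['\t'])) then
        true
      else pvALoop parent child rest in_parent

def has_indented_key_under_py (text : String) (parent : String) (child : String) : Bool :=
  pvALoop parent.toList child.toList (PySem.Chars.splitlines text.toList) false

-- ===== PORT B =====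
def pvBRstripCRLF (l : List Char) : List Char :=
  (l.reverse.dropWhile (fun c => c == '\r' || c == '\n')).reverse

def pvBPMatch (parent h : List Char) : Bool :=
  h == parent || PySem.Chars.startswith h (parent ++ [' '])

def pvBCMatch (child s : List Char) : Bool :=
  s == child || PySem.Chars.startswith s (child ++ [' '])
    || PySem.Chars.startswith s (child ++ ['\t'])

-- blocks are accumulated front-first (Python appends at the back); finished at the end by reversing
def pvBBuild : List (List Char) → List (List Char × List (List Char)) → List (List Char × List (List Char))
  | [], acc => (acc.map (fun b => (b.1, b.2.reverse))).reverse
  | raw :: rest, acc =>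
    let line := pvBRstripCRLF raw
    if line = [] then pvBBuild rest acc
    else
      let stripped := PySem.Chars.lstrip line
      if stripped.length = line.length then pvBBuild rest ((line, []) :: acc)
      else
        match acc with
        | [] => pvBBuild rest []
        | (h, kids) :: bs => pvBBuild rest ((h, stripped :: kids) :: bs)

def has_indented_key_under_py_alt (text : String) (parent : String) (child : String) : Bool :=
  (pvBBuild (PySem.Chars.splitlines text.toList) []).any
    (fun b => pvBPMatch parent.toList b.1 && b.2.any (pvBCMatch child.toList))

-- ===== PRECONDITION & SPEC =====
def Spec_has_indented_key_under_py (text : String) (parent : String) (child : String) (out : Bool) : Prop := out = has_indented_key_under_py_alt text parent child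
instance (text : String) (parent : String) (child : String) (out : Bool) : Decidable (Spec_has_indented_key_under_py text parent child out) := by unfold Spec_has_indented_key_under_py; infer_instance

-- ===== CLAIM (what is proved, stated in full; the proofs are below) =====
def Claim_equal_has_indented_key_under_py : Prop := ∀ (text : String) (parent : String) (child : String), Dom_has_indented_key_under_py text parent child → Spec_has_indented_key_under_py text parent child (has_indented_key_under_py text parent child)

-- ===== LEMMAS AND PROOFS =====
def pvGood (p c : List Char) (b : List Char × List (List Char)) : Bool :=
  pvBPMatch p b.1 && b.2.any (pvBCMatch c)

theorem pvGood_rev (p c : List Char) (b : List Char × List (List Char)) :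
    pvGood p c (b.1, b.2.reverse) = pvGood p c b := by
  simp [pvGood]

theorem pvBBuild_any_final (p c : List Char) (acc : List (List Char × List (List Char))) :
    ((acc.map (fun b => (b.1, b.2.reverse))).reverse).any (pvGood p c) = acc.any (pvGood p c) := by
  simp only [List.any_reverse, List.any_map]
  induction acc with
  | nil => rfl
  | cons b bs ih =>
    simp only [List.any_cons, ih, Function.comp_apply, pvGood_rev]

theorem pvBBuild_any_true (p c : List Char) :
    ∀ (lines : List (List Char)) (acc : List (List Char × List (List Char))),
      acc.any (pvGood p c) = true → (pvBBuild lines acc).any (pvGood p c) = true := by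
  intro lines
  induction lines with
  | nil =>
    intro acc h
    simp only [pvBBuild]
    rw [pvBBuild_any_final, h]
  | cons raw rest ih =>
    intro acc h
    simp only [pvBBuild]
    split
    · exact ih acc h
    · split
      · apply ih
        simp only [List.any_cons, pvGood, Bool.or_eq_true]
        right
        exact h
      · match acc, h with
        | (hd, kids) :: bs, h =>
          apply ih
          simp only [List.any_cons, pvGood, Bool.or_eq_true, Bool.and_eq_true] at h ⊢
          rcases h with ⟨hpm, hkid⟩ | hrest
          · exact Or.inl ⟨hpm, Or.inr hkid⟩
          · exact Or.inr hrest

theorem pvLstrip_len_le (l : List Char) : (PySem.Chars.lstrip l).length ≤ l.length := by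
  simp [PySem.Chars.lstrip]
  exact List.length_dropWhile_le _ _

theorem pvMain (p c : List Char) :
    ∀ (lines : List (List Char)) (inp : Bool) (acc : List (List Char × List (List Char))),
      acc.any (pvGood p c) = false →
      inp = (match acc with | [] => false | b :: _ => pvBPMatch p b.1) →
      pvALoop p c lines inp = (pvBBuild lines acc).any (pvGood p c) := by
  intro lines
  induction lines with
  | nil =>
    intro inp acc hacc _
    simp only [pvALoop, pvBBuild]
    rw [pvBBuild_any_final, hacc]
  | cons raw rest ih =>
    intro inp acc hacc hinp
    simp only [pvALoop, pvBBuild, pvARstripCRLF, pvBRstripCRLF]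
    split
    · exact ih inp acc hacc hinp
    · rename_i hne
      set line := (raw.reverse.dropWhile (fun c => c == '\r' || c == '\n')).reverse with hline
      set stripped := PySem.Chars.lstrip line with hstripped
      by_cases hhdr : stripped.length = line.length
      · -- header line (indent = 0)
        have hind : line.length - stripped.length = 0 := by omega
        rw [if_pos hind, if_pos hhdr]
        apply ih
        · simp only [List.any_cons, pvGood, List.any_nil, Bool.and_false, Bool.false_or]
          exact hacc
        · rfl
      · have hle : stripped.length ≤ line.length := by
          rw [hstripped]; exact pvLstrip_len_le line
        have hind : ¬ (line.length - stripped.length = 0) := by omega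
        rw [if_neg hind, if_neg hhdr]
        match acc, hacc, hinp with
        | [], hacc, hinp =>
          have hinp' : inp = false := hinp
          rw [hinp']
          rw [if_neg (by simp)]
          exact ih false [] (by simp) rfl
        | (hd, kids) :: bs, hacc, hinp =>
          have hinp' : inp = pvBPMatch p hd := hinp
          by_cases hmatch : (inp &&
              (stripped == c
                || PySem.Chars.startswith stripped (c ++ [' '])
                || PySem.Chars.startswith stripped (c ++ ['\t']))) = true
          · rw [if_pos hmatch]
            symm
            apply pvBBuild_any_true
            simp only [Bool.and_eq_true] at hmatch
            obtain ⟨hinpT, hcond⟩ := hmatch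
            simp only [List.any_cons, pvGood, Bool.or_eq_true, Bool.and_eq_true]
            left
            refine ⟨by rw [← hinp']; exact hinpT, Or.inl ?_⟩
            simpa [pvBCMatch] using hcond
          · rw [if_neg hmatch]
            apply ih
            · simp only [List.any_cons, Bool.or_eq_false_iff, pvGood] at hacc ⊢
              obtain ⟨h1, h2⟩ := hacc
              refine ⟨?_, h2⟩
              by_cases hpm : pvBPMatch p hd = true
              · have hinpT : inp = true := by rw [hinp']; exact hpm
                have hcond : (stripped == c
                    || PySem.Chars.startswith stripped (c ++ [' '])
                    || PySem.Chars.startswith stripped (c ++ ['\t'])) = false := by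
                  cases hbig : (stripped == c
                      || PySem.Chars.startswith stripped (c ++ [' '])
                      || PySem.Chars.startswith stripped (c ++ ['\t']))
                  · rfl
                  · exact absurd (by rw [hinpT, hbig]; rfl) hmatch
                have hk : kids.any (pvBCMatch c) = false := by
                  simpa [hpm] using h1
                simp only [hpm, Bool.true_and, Bool.or_eq_false_iff]
                exact ⟨by simpa [pvBCMatch] using hcond, hk⟩
              · simp [hpm]
            · exact hinp

-- ===== VERDICT (by name: the statement is the Claim_ definition above) =====
theorem has_indented_key_under_py_spec : Claim_equal_has_indented_key_under_py := by
  intro text parent child _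
  unfold Spec_has_indented_key_under_py has_indented_key_under_py has_indented_key_under_py_alt
  have h := pvMain parent.toList child.toList (PySem.Chars.splitlines text.toList) false [] (by simp) rfl
  rw [h]
  rfl
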